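-- pv_equiv track=rewrite | github.com/zhuxianglei/query-db-by-email | Sources/common.py | getdbtnsbymaildb
-- ===== SOURCE A (Python) =====
-- def getdbtnsbymaildb(pmaildb,pparalst,pidx):
-- 	#return dbtnsname by databasename in mail
-- 	#attention!!!idx 0 of paralst is mtime,so begin from 1
-- 	#add pidx parameter for loadbalance
-- 	rst=''
-- 	ldbcnt=0
-- 	for idx in range(1,len(pparalst),1):
-- 		if pparalst[idx]['dbtnsdesc'].lower().find(pmaildb.lower())>-1:
-- 			ldbcnt=ldbcnt+1
-- 	if ldbcnt==0:
-- 		return rst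
-- 	else:
-- 		mval=(pidx%ldbcnt)+1
-- 	ldbcnt=0
-- 	for idx in range(1,len(pparalst),1):
-- 		if pparalst[idx]['dbtnsdesc'].lower().find(pmaildb.lower())>-1:
-- 			ldbcnt=ldbcnt+1
-- 			if mval==ldbcnt:
-- 				rst=pparalst[idx]['dbtns']
-- 				break
-- 	return rst
-- ===== SOURCE B (Python) =====
-- def getdbtnsbymaildb(pmaildb, pparalst, pidx):
--     # build the list of matching entries once, then index it directly
--     key = pmaildb.lower()
--     matches = [e for e in pparalst[1:] if e['dbtnsdesc'].lower().find(key) > -1]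
--     if not matches:
--         return ''
--     return matches[pidx % len(matches)]['dbtns']
-- ===== Notes on version B (the rewrite author's own statement) =====
-- stated objective: simpler
-- what changed: A's count-then-rescan pair of filtered loops is replaced by one pass that collects the matching entries into a list and returns matches[pidx % len(matches)]['dbtns'] directly, with no running counter or break.
import Mathlib
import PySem

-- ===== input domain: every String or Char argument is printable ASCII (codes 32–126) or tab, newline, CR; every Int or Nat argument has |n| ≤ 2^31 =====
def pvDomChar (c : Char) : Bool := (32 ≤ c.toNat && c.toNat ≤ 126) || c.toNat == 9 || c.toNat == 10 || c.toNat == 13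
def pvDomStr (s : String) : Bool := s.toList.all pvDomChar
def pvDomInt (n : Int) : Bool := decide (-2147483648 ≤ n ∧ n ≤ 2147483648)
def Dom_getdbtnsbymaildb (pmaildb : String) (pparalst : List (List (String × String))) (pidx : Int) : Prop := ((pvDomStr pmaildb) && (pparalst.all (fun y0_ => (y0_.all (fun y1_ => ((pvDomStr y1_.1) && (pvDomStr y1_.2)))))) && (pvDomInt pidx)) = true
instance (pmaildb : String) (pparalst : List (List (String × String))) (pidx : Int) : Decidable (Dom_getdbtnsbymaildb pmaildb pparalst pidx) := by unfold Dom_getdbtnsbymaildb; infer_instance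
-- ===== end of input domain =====

-- B replaces A's count-then-rescan (two filtered passes with a counter and break) by one
-- filtered pass that collects the matching entries and indexes the list directly: simpler.

-- shared primitives: dict lookup (first match) and the match test e['dbtnsdesc'].lower().find(pmaildb.lower()) > -1
def pvGetS (e : List (String × String)) (k : String) : String :=
  ((PySem.Dict.mk e).get? k).getD ""

def pvMatch (pmaildb : String) (e : List (String × String)) : Bool :=
  PySem.Str.find (PySem.Str.lower (pvGetS e "dbtnsdesc")) (PySem.Str.lower pmaildb) > -1

-- ===== PORT A =====
-- A's second loop with its break, as a fold carrying (done, ldbcnt, rst)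
def pvStepA (pmaildb : String) (mval : Int) (s : Bool × Int × String)
    (e : List (String × String)) : Bool × Int × String :=
  if s.1 then s
  else if pvMatch pmaildb e then
    if mval == s.2.1 + 1 then (true, s.2.1 + 1, pvGetS e "dbtns")
    else (false, s.2.1 + 1, s.2.2)
  else s

-- A's first loop: count the matches over range(1, len(pparalst))
def pvCountA (pmaildb : String) (pparalst : List (List (String × String))) : Int :=
  (PySem.List.pyRange 1 pparalst.length 1).foldl
    (fun c idx => if pvMatch pmaildb (PySem.List.pyGetD pparalst idx []) then c + 1 else c) 0

-- A's second loop over range(1, len(pparalst)) with its break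
def pvScanA (pmaildb : String) (mval : Int) (pparalst : List (List (String × String))) : Bool × Int × String :=
  (PySem.List.pyRange 1 pparalst.length 1).foldl
    (fun s idx => pvStepA pmaildb mval s (PySem.List.pyGetD pparalst idx [])) (false, 0, "")

def getdbtnsbymaildb (pmaildb : String) (pparalst : List (List (String × String))) (pidx : Int) : String :=
  let ldbcnt : Int := pvCountA pmaildb pparalst
  if ldbcnt == 0 then ""
  else
    let mval := (PySem.Int.mod pidx ldbcnt) + 1
    (pvScanA pmaildb mval pparalst).2.2

-- ===== PORT B =====
def getdbtnsbymaildb_alt (pmaildb : String) (pparalst : List (List (String × String))) (pidx : Int) : String :=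
  let ms := (PySem.List.slice pparalst (some 1) none).filter (pvMatch pmaildb)
  if ms = [] then ""
  else pvGetS (PySem.List.pyGetD ms (PySem.Int.mod pidx ms.length) []) "dbtns"

-- ===== PRECONDITION & SPEC =====
-- Pre_ excludes exactly the inputs where the Python raises KeyError: a tail entry without key
-- 'dbtnsdesc', or a selected matching entry without key 'dbtns'.
def Pre_getdbtnsbymaildb (pmaildb : String) (pparalst : List (List (String × String))) (pidx : Int) : Prop :=
  (∀ e ∈ pparalst.drop 1, ((PySem.Dict.mk e).get? "dbtnsdesc").isSome = true) ∧
  ((pparalst.drop 1).filter (pvMatch pmaildb) ≠ [] →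
    ((PySem.Dict.mk (PySem.List.pyGetD ((pparalst.drop 1).filter (pvMatch pmaildb))
      (PySem.Int.mod pidx ((pparalst.drop 1).filter (pvMatch pmaildb)).length) [])).get? "dbtns").isSome = true)
instance (pmaildb : String) (pparalst : List (List (String × String))) (pidx : Int) : Decidable (Pre_getdbtnsbymaildb pmaildb pparalst pidx) := by unfold Pre_getdbtnsbymaildb; infer_instance

def pvWitness_getdbtnsbymaildb : String × (List (List (String × String))) × Int :=
  ("x", [[("mtime", "0")], [("dbtnsdesc", "xdb"), ("dbtns", "t1")], [("dbtnsdesc", "ydb"), ("dbtns", "t2")]], 3)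

def Spec_getdbtnsbymaildb (pmaildb : String) (pparalst : List (List (String × String))) (pidx : Int) (out : String) : Prop := out = getdbtnsbymaildb_alt pmaildb pparalst pidx
instance (pmaildb : String) (pparalst : List (List (String × String))) (pidx : Int) (out : String) : Decidable (Spec_getdbtnsbymaildb pmaildb pparalst pidx out) := by unfold Spec_getdbtnsbymaildb; infer_instance

-- ===== CLAIM (what is proved, stated in full; the proofs are below) =====
def Claim_equal_getdbtnsbymaildb : Prop := ∀ (pmaildb : String) (pparalst : List (List (String × String))) (pidx : Int), Dom_getdbtnsbymaildb pmaildb pparalst pidx → Pre_getdbtnsbymaildb pmaildb pparalst pidx → Spec_getdbtnsbymaildb pmaildb pparalst pidx (getdbtnsbymaildb pmaildb pparalst pidx)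

-- ===== LEMMAS AND PROOFS =====

-- once done=true, the fold is constant
theorem pvStepA_done (pmaildb : String) (mval : Int) (L : List (List (String × String)))
    (c : Int) (r : String) :
    L.foldl (pvStepA pmaildb mval) (true, c, r) = (true, c, r) := by
  induction L with
  | nil => rfl
  | cons e L ih => simpa [pvStepA] using ih

-- the break-loop returns the (mval - cnt)-th remaining match's 'dbtns'
theorem pvStepA_foldl (pmaildb : String) (L : List (List (String × String)))
    (mval cnt : Int) (r : String)
    (h1 : cnt < mval)
    (h2 : mval - cnt ≤ (L.filter (pvMatch pmaildb)).length) :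
    (L.foldl (pvStepA pmaildb mval) (false, cnt, r)).2.2 =
      pvGetS ((L.filter (pvMatch pmaildb)).getD (mval - cnt - 1).toNat []) "dbtns" := by
  induction L generalizing cnt r with
  | nil => simp at h2; omega
  | cons e L ih =>
    by_cases hm : pvMatch pmaildb e
    · by_cases hv : mval = cnt + 1
      · have step : pvStepA pmaildb mval (false, cnt, r) e = (true, cnt + 1, pvGetS e "dbtns") := by
          simp [pvStepA, hm, hv]
        rw [List.foldl_cons, step, pvStepA_done]
        have h0 : (mval - cnt - 1).toNat = 0 := by omega
        simp [hm, h0]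
      · have step : pvStepA pmaildb mval (false, cnt, r) e = (false, cnt + 1, r) := by
          simp [pvStepA, hm, hv]
        rw [List.foldl_cons, step]
        rw [ih (cnt + 1) r (by omega) (by simp [hm] at h2 ⊢; omega)]
        have hsucc : (mval - cnt - 1).toNat = ((mval - (cnt + 1) - 1).toNat) + 1 := by omega
        simp [hm, hsucc]
    · have step : pvStepA pmaildb mval (false, cnt, r) e = (false, cnt, r) := by
        simp [pvStepA, hm]
      rw [List.foldl_cons, step, ih cnt r h1 (by simpa [hm] using h2)]
      simp [hm]

-- the count loop is the filtered length of the tail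
theorem pvCountA_eq (pmaildb : String) (pparalst : List (List (String × String))) :
    pvCountA pmaildb pparalst = (((pparalst.drop 1).filter (pvMatch pmaildb)).length : Int) := by
  unfold pvCountA
  rw [PySem.List.foldl_pyRange_pyGetD' (xs := pparalst) (a := 1) (d := [])
    (f := fun c e => if pvMatch pmaildb e then c + 1 else c) (init := (0 : Int)) (by omega)]
  have : ∀ (L : List (List (String × String))) (c : Int),
      L.foldl (fun c e => if pvMatch pmaildb e then c + 1 else c) c =
        c + ((L.filter (pvMatch pmaildb)).length : Int) := by
    intro L
    induction L with
    | nil => simp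
    | cons e L ih =>
      intro c
      by_cases hm : pvMatch pmaildb e <;> simp [hm, ih] <;> ring
  simpa using this (pparalst.drop 1) 0

-- the scan loop is the break-fold over the tail
theorem pvScanA_eq (pmaildb : String) (mval : Int) (pparalst : List (List (String × String)))
    (h1 : 0 < mval) (h2 : mval ≤ (((pparalst.drop 1).filter (pvMatch pmaildb)).length : Int)) :
    (pvScanA pmaildb mval pparalst).2.2 =
      pvGetS (((pparalst.drop 1).filter (pvMatch pmaildb)).getD (mval - 1).toNat []) "dbtns" := by
  unfold pvScanA
  rw [PySem.List.foldl_pyRange_pyGetD' (xs := pparalst) (a := 1) (d := [])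
    (f := pvStepA pmaildb mval) (init := ((false, 0, "") : Bool × Int × String)) (by omega)]
  have := pvStepA_foldl pmaildb (pparalst.drop 1) mval 0 "" (by omega) (by omega)
  simpa using this

-- ===== VERDICT (by name: the statement is the Claim_ definition above) =====
theorem getdbtnsbymaildb_spec : Claim_equal_getdbtnsbymaildb := by
  intro pmaildb pparalst pidx _hdom _hpre
  unfold Spec_getdbtnsbymaildb
  simp only [getdbtnsbymaildb, getdbtnsbymaildb_alt, PySem.List.slice_from_one, pvCountA_eq]
  rw [← List.drop_one]
  set M := (pparalst.drop 1).filter (pvMatch pmaildb) with hM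
  by_cases hnil : M = []
  · simp [hnil]
  · have hlen : 0 < (M.length : Int) := by
      have := List.length_pos_iff.mpr hnil; exact_mod_cast this
    have hmod0 : 0 ≤ PySem.Int.mod pidx (M.length : Int) := PySem.Int.mod_nonneg _ (by omega)
    have hmodlt : PySem.Int.mod pidx (M.length : Int) < (M.length : Int) := PySem.Int.mod_lt _ (by omega)
    have hne : (((M.length : Int)) == 0) = false := by simp; omega
    simp only [hne, if_neg hnil, Bool.false_eq_true, if_false]
    rw [pvScanA_eq pmaildb (PySem.Int.mod pidx (M.length : Int) + 1) pparalst (by omega) (by rw [← hM]; omega)]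
    rw [← hM]
    congr 1
    have hcast : PySem.Int.mod pidx (M.length : Int)
        = (((PySem.Int.mod pidx (M.length : Int)).toNat : Nat) : Int) := by omega
    rw [hcast, PySem.List.pyGetD_natCast]
    congr 1
    omega
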